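-- pv_equiv track=rewrite | github.com/BrunoDVolpe/mytrainer | trainer/models.py | get_efficiency
-- ===== SOURCE A (Python) =====
-- def get_efficiency(classes):
--
--     count = 0
--     done = 0
--     for class_status in classes:
--         if class_status not in ['na', 'hd', '']:
--             count += 1
--         if class_status == 'ok' or class_status == 'gc':
--             done += 1
--
--     return {'done': done, 'count': count}
-- ===== SOURCE B (Python) =====
-- def get_efficiency(classes):
--     done = classes.count('ok') + classes.count('gc')
--     count = len(classes) - classes.count('na') - classes.count('hd') - classes.count('')
--     return {'done': done, 'count': count}
-- ===== Notes on version B (the rewrite author's own statement) =====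
-- stated objective: simpler
-- what changed: Replaces the per-element two-branch accumulator loop with tally-then-arithmetic: done is the sum of counts of 'ok' and 'gc', and count is the length minus the counts of the excluded statuses 'na', 'hd' and ''.
import Mathlib
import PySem

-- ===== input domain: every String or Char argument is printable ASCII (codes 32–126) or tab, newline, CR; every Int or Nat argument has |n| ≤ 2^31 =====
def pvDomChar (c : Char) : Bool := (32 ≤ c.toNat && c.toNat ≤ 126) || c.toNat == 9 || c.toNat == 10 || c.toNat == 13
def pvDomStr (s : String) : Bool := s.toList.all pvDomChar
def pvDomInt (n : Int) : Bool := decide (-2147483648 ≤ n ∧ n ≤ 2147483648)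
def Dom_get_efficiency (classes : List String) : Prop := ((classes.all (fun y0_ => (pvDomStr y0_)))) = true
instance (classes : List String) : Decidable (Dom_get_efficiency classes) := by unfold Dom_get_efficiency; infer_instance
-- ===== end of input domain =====

-- B replaces A's two-branch accumulator loop with tally-then-arithmetic over list counts (objective: simpler).

-- ===== PORT A =====
def get_efficiency (classes : List String) : List (String × Int) :=
  let st := classes.foldl (fun (st : Int × Int) class_status =>
      let st1 := if class_status ∉ ["na", "hd", ""] then (st.1 + 1, st.2) else st
      if class_status = "ok" ∨ class_status = "gc" then (st1.1, st1.2 + 1) else st1)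
    (0, 0)
  [("done", st.2), ("count", st.1)]

-- ===== PORT B =====
def get_efficiency_alt (classes : List String) : List (String × Int) :=
  let done : Int := (PySem.List.count classes "ok" : Int) + (PySem.List.count classes "gc" : Int)
  let count : Int := (classes.length : Int) - (PySem.List.count classes "na" : Int)
      - (PySem.List.count classes "hd" : Int) - (PySem.List.count classes "" : Int)
  [("done", done), ("count", count)]

-- ===== PRECONDITION & SPEC =====
def Spec_get_efficiency (classes : List String) (out : List (String × Int)) : Prop := out = get_efficiency_alt classes
instance (classes : List String) (out : List (String × Int)) : Decidable (Spec_get_efficiency classes out) := by unfold Spec_get_efficiency; infer_instance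

-- ===== CLAIM (what is proved, stated in full; the proofs are below) =====
def Claim_equal_get_efficiency : Prop := ∀ (classes : List String), Dom_get_efficiency classes → Spec_get_efficiency classes (get_efficiency classes)

-- ===== LEMMAS AND PROOFS =====
theorem get_efficiency_foldl (classes : List String) (c d : Int) :
    classes.foldl (fun (st : Int × Int) class_status =>
      let st1 := if class_status ∉ ["na", "hd", ""] then (st.1 + 1, st.2) else st
      if class_status = "ok" ∨ class_status = "gc" then (st1.1, st1.2 + 1) else st1) (c, d)
    = (c + (classes.length : Int) - (classes.count "na" : Int) - (classes.count "hd" : Int)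
        - (classes.count "" : Int),
       d + (classes.count "ok" : Int) + (classes.count "gc" : Int)) := by
  induction classes generalizing c d with
  | nil => simp
  | cons x xs ih =>
    simp only [List.foldl_cons, List.count_cons, List.length_cons]
    rw [ih]
    by_cases h1 : x = "na" <;> by_cases h2 : x = "hd" <;> by_cases h3 : x = "" <;>
      by_cases h4 : x = "ok" <;> by_cases h5 : x = "gc" <;>
      simp_all <;> (try constructor) <;> push_cast <;> ring

-- ===== VERDICT (by name: the statement is the Claim_ definition above) =====
theorem get_efficiency_spec : Claim_equal_get_efficiency := by
  intro classes _
  unfold Spec_get_efficiency get_efficiency get_efficiency_alt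
  rw [get_efficiency_foldl]
  simp [PySem.List.count_eq]
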